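-- pv_equiv track=rewrite | github.com/indes/leetcode | math/728-self-dividing-numbers/solution.py | is_dividing
-- ===== SOURCE A (Python) =====
-- def is_dividing(num: int) -> bool:
--     if (num < 10):
--         return True
--     n = num
--     while (n):
--         div = n % 10
--         n //= 10
--         if (div == 0 or num % div != 0):
--             return False
--
--     return True
-- ===== SOURCE B (Python) =====
-- def is_dividing(num: int) -> bool:
--     if num < 10:
--         return True
--     return all(int(d) != 0 and num % int(d) == 0 for d in str(num))
-- ===== Notes on version B (the rewrite author's own statement) =====
-- stated objective: idiomatic
-- what changed: B keeps the num<10 guard but replaces the arithmetic %-10//-10 digit-peeling while-loop by an all() comprehension over the decimal string of num, traversing digits forward via str(num) instead of extracting them in reverse.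
import Mathlib
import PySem

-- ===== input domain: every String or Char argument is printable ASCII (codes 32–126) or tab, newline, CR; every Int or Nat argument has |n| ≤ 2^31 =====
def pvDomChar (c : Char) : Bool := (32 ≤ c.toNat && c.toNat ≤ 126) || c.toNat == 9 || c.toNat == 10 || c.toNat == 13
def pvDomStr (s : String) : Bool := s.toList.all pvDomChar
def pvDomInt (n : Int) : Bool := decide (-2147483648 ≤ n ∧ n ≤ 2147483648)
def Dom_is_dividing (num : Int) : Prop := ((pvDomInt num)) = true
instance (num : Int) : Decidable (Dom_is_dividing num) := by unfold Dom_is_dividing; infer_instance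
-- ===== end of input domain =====

-- B replaces A's %10//10 digit-peeling loop by an all() over the decimal string's digits (idiomatic, same cost).

-- ===== PORT A =====
-- the `while (n):` loop; the totalizing `n ≤ 0` guard coincides with Python's `n ≠ 0` test on every
-- reachable state, since the loop is only entered with n = num ≥ 10 and n stays nonnegative.
def isDivLoopA (num n : Int) : Bool :=
  if n ≤ 0 then true
  else
    let dv := PySem.Int.mod n 10
    let n' := PySem.Int.floordiv n 10
    if dv = 0 ∨ PySem.Int.mod num dv ≠ 0 then false
    else isDivLoopA num n'
termination_by n.toNat
decreasing_by
  have h10 : PySem.Int.floordiv n 10 = n / 10 := PySem.Int.floordiv_eq_ediv_of_pos (by omega)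
  simp only [h10]
  omega

def is_dividing (num : Int) : Bool :=
  if num < 10 then true
  else isDivLoopA num num

-- ===== PORT B =====
-- `int(d)` for the single digit character d: exact, since str(num) for num ≥ 10 contains only '0'..'9'.
def is_dividing_alt (num : Int) : Bool :=
  if num < 10 then true
  else (PySem.Int.toStr num).toList.all (fun c =>
    let v : Int := (c.toNat : Int) - 48
    decide (v ≠ 0) && decide (PySem.Int.mod num v = 0))

-- ===== PRECONDITION & SPEC =====
def Spec_is_dividing (num : Int) (out : Bool) : Prop := out = is_dividing_alt num
instance (num : Int) (out : Bool) : Decidable (Spec_is_dividing num out) := by unfold Spec_is_dividing; infer_instance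

-- ===== CLAIM (what is proved, stated in full; the proofs are below) =====
def Claim_equal_is_dividing : Prop := ∀ (num : Int), Dom_is_dividing num → Spec_is_dividing num (is_dividing num)

-- ===== LEMMAS AND PROOFS =====

-- the digits of m, least significant first (the order A's loop peels them)
def digitsLow : Nat → List Nat
  | 0 => []
  | m + 1 => (m + 1) % 10 :: digitsLow ((m + 1) / 10)
decreasing_by exact Nat.div_lt_self (Nat.succ_pos m) (by omega)

lemma digitsLow_lt_ten (m : Nat) : ∀ d ∈ digitsLow m, d < 10 := by
  induction m using Nat.strong_induction_on with
  | _ m ih =>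
    match m with
    | 0 => simp [digitsLow]
    | m + 1 =>
      intro d hd
      rw [digitsLow] at hd
      rcases List.mem_cons.mp hd with h | h
      · omega
      · exact ih ((m + 1) / 10) (Nat.div_lt_self (Nat.succ_pos m) (by omega)) d h

lemma loopA_eq (num : Int) (m : Nat) :
    isDivLoopA num (m : Int) =
      (digitsLow m).all (fun d => !(decide ((d : Int) = 0) || decide (PySem.Int.mod num (d : Int) ≠ 0))) := by
  induction m using Nat.strong_induction_on with
  | _ m ih =>
    match m with
    | 0 => simp [isDivLoopA, digitsLow]
    | m + 1 =>
      rw [isDivLoopA, digitsLow]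
      have hpos : ¬ ((m + 1 : Nat) : Int) ≤ 0 := by omega
      rw [if_neg hpos]
      have hmod : PySem.Int.mod ((m + 1 : Nat) : Int) 10 = (((m + 1) % 10 : Nat) : Int) := by
        exact_mod_cast PySem.Int.mod_natCast (m + 1) 10
      have hdiv : PySem.Int.floordiv ((m + 1 : Nat) : Int) 10 = (((m + 1) / 10 : Nat) : Int) := by
        exact_mod_cast PySem.Int.floordiv_natCast (m + 1) 10
      simp only [hmod, hdiv]
      by_cases hc : (((m + 1) % 10 : Nat) : Int) = 0 ∨ PySem.Int.mod num (((m + 1) % 10 : Nat) : Int) ≠ 0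
      · rw [if_pos hc]
        have hhd : (!(decide ((((m + 1) % 10 : Nat) : Int) = 0) ||
            decide (PySem.Int.mod num (((m + 1) % 10 : Nat) : Int) ≠ 0))) = false := by
          rcases hc with h | h
          · rw [decide_eq_true h, Bool.true_or, Bool.not_true]
          · rw [decide_eq_true h, Bool.or_true, Bool.not_true]
        rw [List.all_cons, hhd, Bool.false_and]
      · rw [if_neg hc]
        push Not at hc
        rw [ih ((m + 1) / 10) (Nat.div_lt_self (Nat.succ_pos m) (by omega))]
        have hhd : (!(decide ((((m + 1) % 10 : Nat) : Int) = 0) ||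
            decide (PySem.Int.mod num (((m + 1) % 10 : Nat) : Int) ≠ 0))) = true := by
          rw [decide_eq_false hc.1, decide_eq_false (not_not_intro hc.2),
            Bool.or_false, Bool.not_false]
        rw [List.all_cons, hhd, Bool.true_and]

-- Nat.toDigits produces exactly the digit characters of digitsLow, reversed
lemma toDigitsCore_eq (fuel : Nat) : ∀ (m : Nat) (acc : List Char), 0 < m → m ≤ fuel →
    Nat.toDigitsCore 10 fuel m acc = ((digitsLow m).map Nat.digitChar).reverse ++ acc := by
  induction fuel with
  | zero => intro m acc h1 h2; omega
  | succ fuel ihf =>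
    intro m acc h1 h2
    match m, h1 with
    | m + 1, _ =>
      rw [Nat.toDigitsCore, digitsLow]
      by_cases hz : (m + 1) / 10 = 0
      · rw [if_pos hz, hz]
        simp [digitsLow]
      · rw [if_neg hz]
        rw [ihf ((m + 1) / 10) _ (Nat.pos_of_ne_zero hz) (by
          have := Nat.div_lt_self (Nat.succ_pos m) (show 1 < 10 by omega); omega)]
        simp

lemma all_congr_mem {a : Type} (l : List a) (p q : a → Bool)
    (h : ∀ x ∈ l, p x = q x) : l.all p = l.all q := by
  induction l with
  | nil => rfl
  | cons x xs ih => simp_all [List.all_cons]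

lemma digitChar_val (d : Nat) (hd : d < 10) : ((Nat.digitChar d).toNat : Int) - 48 = (d : Int) := by
  interval_cases d <;> decide

-- ===== VERDICT (by name: the statement is the Claim_ definition above) =====
theorem is_dividing_spec : Claim_equal_is_dividing := by
  intro num _
  unfold Spec_is_dividing is_dividing is_dividing_alt
  by_cases h : num < 10
  · simp [h]
  · rw [if_neg h, if_neg h]
    obtain ⟨m, rfl⟩ : ∃ m : Nat, num = (m : Int) :=
      ⟨num.toNat, (Int.toNat_of_nonneg (by omega)).symm⟩
    have hpos : 0 < m := by omega
    rw [loopA_eq]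
    have htl : (PySem.Int.toStr (m : Int)).toList = PySem.Int.toChars (m : Int) :=
      PySem.Int.toList_toStr (m : Int)
    have hch : PySem.Int.toChars (m : Int) = Nat.toDigits 10 m := by
      unfold PySem.Int.toChars
      rw [if_neg (by omega)]
      simp
    rw [htl, hch]
    unfold Nat.toDigits
    rw [toDigitsCore_eq (m + 1) m [] hpos (by omega)]
    rw [List.append_nil, List.all_reverse, List.all_map]
    apply all_congr_mem
    intro d hd
    have hlt := digitsLow_lt_ten m d hd
    simp only [Function.comp]
    rw [digitChar_val d hlt]
    by_cases h1 : (d : Int) = 0 <;> by_cases h2 : PySem.Int.mod (m : Int) (d : Int) = 0 <;>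
      simp [h1, h2]
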